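-- pv_equiv track=rewrite | github.com/ecotaxa/ecopart | py/appli/part/drawchart.py | GetTaxoHistoLimit
-- ===== SOURCE A (Python) =====
-- DepthTaxoHistoLimit = [0, 25, 50, 75, 100, 125, 150, 200, 250, 300, 350, 400, 450, 500, 600, 700, 800, 900, 1000, 1250,
--                        1500, 1750, 2000, 2250, 2500, 2750,
--                        3000, 3250, 3500, 3750, 4000, 4250, 4500, 4750, 5000, 5250, 5500, 5750, 6000, 7000, 8000, 9000,
--                        10000, 11000,
--                        12000, 13000, 14000, 15000, 20000, 50000]
--
-- def GetTaxoHistoLimit(MaxDepth):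
--     res = []
--     break_on_next = False
--     for d in DepthTaxoHistoLimit:
--         res.append(d)
--         if break_on_next:
--             break
--         if d > MaxDepth:
--             break_on_next = True
--     return res
-- ===== SOURCE B (Python) =====
-- DepthTaxoHistoLimit = [0, 25, 50, 75, 100, 125, 150, 200, 250, 300, 350, 400, 450, 500, 600, 700, 800, 900, 1000, 1250,
--                        1500, 1750, 2000, 2250, 2500, 2750,
--                        3000, 3250, 3500, 3750, 4000, 4250, 4500, 4750, 5000, 5250, 5500, 5750, 6000, 7000, 8000, 9000,
--                        10000, 11000,
--                        12000, 13000, 14000, 15000, 20000, 50000]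
--
-- def GetTaxoHistoLimit(MaxDepth):
--     # i = index of the first limit strictly greater than MaxDepth (list is sorted ascending);
--     # keep that limit and one more; slice clamping returns the whole list when none exceeds MaxDepth.
--     i = sum(1 for d in DepthTaxoHistoLimit if d <= MaxDepth)
--     return DepthTaxoHistoLimit[:i + 2]
-- ===== Notes on version B (the rewrite author's own statement) =====
-- stated objective: simpler
-- what changed: Replaces A's stateful scan with a break_on_next flag by counting the limits <= MaxDepth and returning one closed-form slice [:count+2] of the sorted constant list.
import Mathlib
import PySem

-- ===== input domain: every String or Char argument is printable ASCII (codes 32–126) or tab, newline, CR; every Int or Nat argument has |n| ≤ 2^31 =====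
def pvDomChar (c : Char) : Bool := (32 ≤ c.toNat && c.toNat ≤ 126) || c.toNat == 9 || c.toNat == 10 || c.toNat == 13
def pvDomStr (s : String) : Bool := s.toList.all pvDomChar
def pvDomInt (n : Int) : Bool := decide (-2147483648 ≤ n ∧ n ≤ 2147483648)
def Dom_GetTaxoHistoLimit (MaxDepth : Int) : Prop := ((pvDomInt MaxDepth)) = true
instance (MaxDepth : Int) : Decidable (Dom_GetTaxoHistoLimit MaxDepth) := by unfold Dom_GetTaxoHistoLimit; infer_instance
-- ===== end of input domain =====

-- B replaces A's flag-and-break scan by a count of limits ≤ MaxDepth plus one closed-form slice (simpler).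

def DepthTaxoHistoLimit : List Int := [0, 25, 50, 75, 100, 125, 150, 200, 250, 300, 350, 400, 450, 500, 600, 700, 800, 900, 1000, 1250,
                       1500, 1750, 2000, 2250, 2500, 2750,
                       3000, 3250, 3500, 3750, 4000, 4250, 4500, 4750, 5000, 5250, 5500, 5750, 6000, 7000, 8000, 9000,
                       10000, 11000,
                       12000, 13000, 14000, 15000, 20000, 50000]

-- ===== PORT A =====
-- the for-loop over DepthTaxoHistoLimit with its break_on_next flag and res accumulator
def gtlGo (MaxDepth : Int) : List Int → Bool → List Int → List Int
  | [], _, res => res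
  | d :: t, breakOnNext, res =>
    let res' := res ++ [d]
    if breakOnNext then res'
    else if d > MaxDepth then gtlGo MaxDepth t true res'
    else gtlGo MaxDepth t false res'

def GetTaxoHistoLimit (MaxDepth : Int) : List Int := gtlGo MaxDepth DepthTaxoHistoLimit false []

-- ===== PORT B =====
def GetTaxoHistoLimit_alt (MaxDepth : Int) : List Int :=
  let i : Int := (DepthTaxoHistoLimit.map (fun d => if d ≤ MaxDepth then (1 : Int) else 0)).sum
  PySem.List.slice DepthTaxoHistoLimit none (some (i + 2))

-- ===== PRECONDITION & SPEC =====
def Spec_GetTaxoHistoLimit (MaxDepth : Int) (out : List Int) : Prop := out = GetTaxoHistoLimit_alt MaxDepth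
instance (MaxDepth : Int) (out : List Int) : Decidable (Spec_GetTaxoHistoLimit MaxDepth out) := by unfold Spec_GetTaxoHistoLimit; infer_instance

-- ===== CLAIM (what is proved, stated in full; the proofs are below) =====
def Claim_equal_GetTaxoHistoLimit : Prop := ∀ (MaxDepth : Int), Dom_GetTaxoHistoLimit MaxDepth → Spec_GetTaxoHistoLimit MaxDepth (GetTaxoHistoLimit MaxDepth)

-- ===== LEMMAS AND PROOFS =====

-- once the flag is set, the loop appends exactly one more element
theorem gtlGo_true (m : Int) (l res : List Int) : gtlGo m l true res = res ++ l.take 1 := by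
  cases l <;> simp [gtlGo]

-- on a sorted list the loop returns res ++ the first (count of ≤ m) + 2 elements
theorem gtlGo_false (m : Int) (l : List Int) (h : l.Pairwise (· ≤ ·)) :
    ∀ res, gtlGo m l false res = res ++ l.take (l.countP (fun d => decide (d ≤ m)) + 2) := by
  induction l with
  | nil => intro res; simp [gtlGo]
  | cons d t ih =>
    intro res
    rcases List.pairwise_cons.mp h with ⟨hd, ht⟩
    by_cases hdm : d > m
    · have hc : (d :: t).countP (fun x => decide (x ≤ m)) = 0 := by
        rw [List.countP_eq_zero]
        intro x hx
        rcases List.mem_cons.mp hx with rfl | hx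
        · simpa using not_le.mpr hdm
        · exact by simpa using not_le.mpr (lt_of_lt_of_le hdm (hd x hx))
      simp [gtlGo, hdm, gtlGo_true, hc, List.take_succ_cons]
    · have hc : (d :: t).countP (fun x => decide (x ≤ m)) = t.countP (fun x => decide (x ≤ m)) + 1 := by
        simp [not_lt.mp hdm]
      rw [hc]
      simp only [gtlGo, Bool.false_eq_true, if_false, if_neg hdm, ih ht]
      have h3 : t.countP (fun x => decide (x ≤ m)) + 1 + 2
          = (t.countP (fun x => decide (x ≤ m)) + 2) + 1 := by omega
      rw [h3, List.take_succ_cons]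
      simp

theorem GetTaxoHistoLimit_spec : Claim_equal_GetTaxoHistoLimit := by
  intro m _
  unfold Spec_GetTaxoHistoLimit GetTaxoHistoLimit GetTaxoHistoLimit_alt
  rw [gtlGo_false m DepthTaxoHistoLimit (by decide)]
  have hsum : ((DepthTaxoHistoLimit.map (fun d => if d ≤ m then (1 : Int) else 0)).sum)
      = ((DepthTaxoHistoLimit.countP (fun d => decide (d ≤ m)) : Nat) : Int) := by
    rw [← PySem.List.sum_map_ite_one_zero (fun d => decide (d ≤ m))]
    simp
  simp only [hsum]
  have hcast : (((DepthTaxoHistoLimit.countP (fun d => decide (d ≤ m)) : Nat) : Int) + 2)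
      = (((DepthTaxoHistoLimit.countP (fun d => decide (d ≤ m)) + 2 : Nat) : Int)) := by push_cast; ring
  rw [hcast, PySem.List.slice_to_natCast]
  simp
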